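-- pv_equiv track=rewrite | github.com/xaviruvpadhiyar98/LeetCode-Problem-Submissions | Divide Two Integers.py | divide_positive
-- ===== SOURCE A (Python) =====
-- def divide_positive(dividend: int, divisor: int) -> int:
--     res = 0
--     while dividend >= divisor:
--         tmp = divisor
--         cnt = 1
--         while tmp <= (dividend >> 1):
--             tmp <<= 1
--             cnt <<= 1
--         res += cnt
--         dividend -= tmp
--     return res
-- ===== SOURCE B (Python) =====
-- def divide_positive(dividend: int, divisor: int) -> int:
--     if dividend < divisor:
--         return 0
--     i = 0
--     while (divisor << (i + 1)) <= dividend: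
--         i += 1
--     res = 0
--     while i >= 0:
--         if (divisor << i) <= dividend:
--             res += 1 << i
--             dividend -= divisor << i
--         i -= 1
--     return res
-- ===== Notes on version B (the rewrite author's own statement) =====
-- stated objective: faster
-- what changed: B computes the quotient MSB-first: one ascent to the highest useful bit position, then a single descending pass over bit positions subtracting shifted divisors, instead of A's nested loop that re-doubles from the divisor on every outer iteration.
import Mathlib
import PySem

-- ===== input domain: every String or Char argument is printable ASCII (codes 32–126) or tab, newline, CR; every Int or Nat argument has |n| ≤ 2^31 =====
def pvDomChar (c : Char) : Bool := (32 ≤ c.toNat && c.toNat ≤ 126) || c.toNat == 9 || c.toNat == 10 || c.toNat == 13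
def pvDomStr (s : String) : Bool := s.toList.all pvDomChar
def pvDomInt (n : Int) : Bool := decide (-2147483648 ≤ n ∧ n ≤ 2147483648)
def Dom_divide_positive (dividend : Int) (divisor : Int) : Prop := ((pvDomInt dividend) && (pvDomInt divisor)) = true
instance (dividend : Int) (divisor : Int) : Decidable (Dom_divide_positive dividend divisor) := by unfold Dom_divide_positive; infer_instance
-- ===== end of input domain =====

-- B computes the quotient MSB-first (one ascent to the top bit, one descending pass) instead of A's nested re-doubling that restarts each outer iteration; faster by a constant factor.


-- ===== PORT A =====
-- inner 'while tmp <= (dividend >> 1): tmp <<= 1; cnt <<= 1'.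
-- 'dividend >> 1' is floor division by 2 (PySem.Int.floordiv); 'x <<= 1' is x*2 (exact on all ints).
-- fuel is a totality device only: innerA_fuel_char below proves the supplied fuel is never exhausted on admitted inputs.
def innerA (dividend tmp cnt : Int) : Nat → Int × Int
  | 0 => (tmp, cnt)
  | fuel + 1 =>
    if tmp ≤ PySem.Int.floordiv dividend 2 then
      innerA dividend (tmp * 2) (cnt * 2) fuel
    else (tmp, cnt)

-- outer 'while dividend >= divisor: …; res += cnt; dividend -= tmp'; fuel is a totality device only (see outerA_eq)
def outerA (divisor : Int) (dividend res : Int) : Nat → Int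
  | 0 => res
  | fuel + 1 =>
    if divisor ≤ dividend then
      let p := innerA dividend divisor 1 dividend.toNat
      outerA divisor (dividend - p.1) (res + p.2) fuel
    else res

def divide_positive (dividend : Int) (divisor : Int) : Int :=
  outerA divisor dividend 0 (dividend.toNat + 1)

-- ===== PORT B =====
-- 'divisor << (i+1)' is divisor * 2^(i+1), '1 << i' is 2^i (exact on all ints); fuel is a totality device only (see ascendB_bound)
def ascendB (dividend divisor : Int) (i : Nat) : Nat → Nat
  | 0 => i
  | fuel + 1 =>
    if divisor * 2 ^ (i + 1) ≤ dividend then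
      ascendB dividend divisor (i + 1) fuel
    else i

-- the Python 'while i >= 0: … i -= 1' descent, i ported as a Nat counter
def descendB (dividend divisor res : Int) (i : Nat) : Int :=
  match i with
  | 0 => if divisor * 2 ^ (0 : Nat) ≤ dividend then res + 2 ^ (0 : Nat) else res
  | j + 1 =>
    if divisor * 2 ^ (j + 1) ≤ dividend then
      descendB (dividend - divisor * 2 ^ (j + 1)) divisor (res + 2 ^ (j + 1)) j
    else
      descendB dividend divisor res j

def divide_positive_alt (dividend : Int) (divisor : Int) : Int :=
  if dividend < divisor then 0
  else descendB dividend divisor 0 (ascendB dividend divisor 0 dividend.toNat)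

-- ===== PRECONDITION & SPEC =====
-- A loops forever when divisor ≤ 0 and dividend ≥ divisor; Pre_ admits exactly the inputs on which A terminates.
def Pre_divide_positive (dividend : Int) (divisor : Int) : Prop := 1 ≤ divisor ∨ dividend < divisor
instance (dividend : Int) (divisor : Int) : Decidable (Pre_divide_positive dividend divisor) := by unfold Pre_divide_positive; infer_instance
def pvWitness_divide_positive : Int × Int := (23, 5)

def Spec_divide_positive (dividend : Int) (divisor : Int) (out : Int) : Prop := out = divide_positive_alt dividend divisor
instance (dividend : Int) (divisor : Int) (out : Int) : Decidable (Spec_divide_positive dividend divisor out) := by unfold Spec_divide_positive; infer_instance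

-- ===== CLAIM (what is proved, stated in full; the proofs are below) =====
def Claim_equal_divide_positive : Prop := ∀ (dividend : Int) (divisor : Int), Dom_divide_positive dividend divisor → Pre_divide_positive dividend divisor → Spec_divide_positive dividend divisor (divide_positive dividend divisor)

-- ===== LEMMAS AND PROOFS =====

-- any integer is below 2 to its own toNat-th power
theorem int_lt_two_pow_toNat (d : Int) : d < 2 ^ d.toNat := by
  have h := Nat.lt_two_pow_self (n := d.toNat)
  have : (d.toNat : Int) < ((2 ^ d.toNat : Nat) : Int) := by exact_mod_cast h
  push_cast at this
  omega

-- the inner loop returns (tmp*2^k, cnt*2^k) for the k that pushes tmp into (dividend/2, dividend]; the fuel hypothesis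
-- 'dividend < tmp * 2^fuel' certifies the fuel is never exhausted
theorem innerA_fuel_char (dividend : Int) :
    ∀ (fuel : Nat) (tmp cnt : Int), 1 ≤ tmp → tmp ≤ dividend → dividend < tmp * 2 ^ fuel →
      ∃ k : Nat, innerA dividend tmp cnt fuel = (tmp * 2 ^ k, cnt * 2 ^ k) ∧
        tmp * 2 ^ k ≤ dividend ∧ dividend < 2 * (tmp * 2 ^ k) := by
  intro fuel
  induction fuel with
  | zero =>
    intro tmp cnt h1 h2 hf
    simp at hf
    omega
  | succ f ih =>
    intro tmp cnt h1 h2 hf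
    rw [innerA]
    split
    · next h =>
      have hd : tmp * 2 ≤ dividend := (PySem.Int.le_floordiv_iff_mul_le (by norm_num)).mp h
      have hf' : dividend < tmp * 2 * 2 ^ f := by
        have : tmp * 2 ^ (f + 1) = tmp * 2 * 2 ^ f := by ring
        omega
      obtain ⟨k, hk, hle, hlt⟩ := ih (tmp * 2) (cnt * 2) (by omega) (by omega) hf'
      refine ⟨k + 1, by rw [hk]; congr 1 <;> ring, ?_, ?_⟩
      · rw [pow_succ]; nlinarith [hle]
      · rw [pow_succ]; nlinarith [hlt]
    · next h =>
      have hd : dividend < tmp * 2 :=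
        (PySem.Int.floordiv_lt_iff_lt_mul (by norm_num)).mp (by omega)
      exact ⟨0, by simp, by simpa using h2, by omega⟩

-- the outer loop adds ⌊dividend/divisor⌋ to res (Euclidean = floor division since both are nonnegative here);
-- fuel hypothesis 'dividend.toNat < fuel' certifies the fuel is never exhausted
theorem outerA_eq (divisor : Int) (hd : 1 ≤ divisor) :
    ∀ (fuel : Nat) (dividend res : Int), dividend.toNat < fuel → 0 ≤ dividend →
      outerA divisor dividend res fuel = res + dividend / divisor := by
  intro fuel
  induction fuel with
  | zero => omega
  | succ f ih =>
    intro dividend res hn h0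
    rw [outerA]
    split
    · next h =>
      have hfuel : dividend < divisor * 2 ^ dividend.toNat := by
        have h2 := int_lt_two_pow_toNat dividend
        nlinarith [pow_pos (by norm_num : (0:Int) < 2) dividend.toNat]
      obtain ⟨k, hk, hle, hlt⟩ := innerA_fuel_char dividend dividend.toNat divisor 1 hd h hfuel
      simp only [hk, one_mul]
      have hpow : (1 : Int) ≤ 2 ^ k := one_le_pow₀ (by norm_num)
      have hds : (1 : Int) ≤ divisor * 2 ^ k := one_le_mul_of_one_le_of_one_le hd hpow
      rw [ih (dividend - divisor * 2 ^ k) (res + 2 ^ k) (by omega) (by omega)]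
      have := Int.add_mul_ediv_right (dividend - divisor * 2 ^ k) (2 ^ k) (by omega : divisor ≠ 0)
      have heq : dividend - divisor * 2 ^ k + 2 ^ k * divisor = dividend := by ring
      rw [heq] at this
      omega
    · next h =>
      have hlt : dividend < divisor := by omega
      have : dividend / divisor = 0 := Int.ediv_eq_zero_of_lt h0 hlt
      omega

-- the ascent stops at a bit position whose next shift overshoots the dividend; the fuel hypothesis certifies sufficiency
theorem ascendB_bound (dividend divisor : Int) :
    ∀ (fuel i : Nat), dividend < divisor * 2 ^ (i + 1 + fuel) →
      dividend < divisor * 2 ^ (ascendB dividend divisor i fuel + 1) := by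
  intro fuel
  induction fuel with
  | zero =>
    intro i hf
    rw [ascendB]
    simpa using hf
  | succ f ih =>
    intro i hf
    rw [ascendB]
    split
    · next h =>
      exact ih (i + 1) (by rw [show i + 1 + 1 + f = i + 1 + (f + 1) from by omega]; exact hf)
    · next h =>
      omega

-- the descent adds ⌊dividend/divisor⌋ to res whenever dividend fits below the starting bit position
theorem descendB_eq (divisor : Int) (hd : 1 ≤ divisor) :
    ∀ (i : Nat) (dividend res : Int), 0 ≤ dividend → dividend < divisor * 2 ^ (i + 1) →
      descendB dividend divisor res i = res + dividend / divisor := by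
  intro i
  induction i with
  | zero =>
    intro dividend res h0 hb
    rw [descendB]
    simp only [pow_zero, mul_one] at *
    split
    · next h =>
      have h2 : dividend - divisor < divisor := by omega
      have := Int.add_mul_ediv_right (dividend - divisor) 1 (by omega : divisor ≠ 0)
      have h3 : (dividend - divisor) / divisor = 0 := Int.ediv_eq_zero_of_lt (by omega) h2
      simp at this
      omega
    · next h =>
      have : dividend / divisor = 0 := Int.ediv_eq_zero_of_lt h0 (by omega)
      omega
  | succ j ih =>
    intro dividend res h0 hb
    rw [descendB]
    have hpow : (1 : Int) ≤ 2 ^ (j + 1) := one_le_pow₀ (by norm_num)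
    split
    · next h =>
      have hb' : dividend - divisor * 2 ^ (j + 1) < divisor * 2 ^ (j + 1) := by
        have : divisor * 2 ^ (j + 1 + 1) = 2 * (divisor * 2 ^ (j + 1)) := by ring
        omega
      rw [ih (dividend - divisor * 2 ^ (j + 1)) (res + 2 ^ (j + 1)) (by omega) hb']
      have := Int.add_mul_ediv_right (dividend - divisor * 2 ^ (j + 1)) (2 ^ (j + 1)) (by omega : divisor ≠ 0)
      have heq : dividend - divisor * 2 ^ (j + 1) + 2 ^ (j + 1) * divisor = dividend := by ring
      rw [heq] at this
      omega
    · next h =>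
      exact ih dividend res h0 (by omega)

-- ===== VERDICT (by name: the statement is the Claim_ definition above) =====
theorem divide_positive_spec : Claim_equal_divide_positive := by
  intro dividend divisor _ hpre
  unfold Spec_divide_positive divide_positive divide_positive_alt
  by_cases hlt : dividend < divisor
  · rw [outerA]
    simp [hlt]
  · have hd : 1 ≤ divisor := by
      rcases hpre with h | h
      · exact h
      · omega
    have h0 : 0 ≤ dividend := by omega
    rw [if_neg hlt]
    rw [outerA_eq divisor hd (dividend.toNat + 1) dividend 0 (by omega) h0]
    have hasc : dividend < divisor * 2 ^ (ascendB dividend divisor 0 dividend.toNat + 1) := by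
      apply ascendB_bound
      have h2 := int_lt_two_pow_toNat dividend
      have hm : (2:Int) ^ dividend.toNat ≤ divisor * 2 ^ (0 + 1 + dividend.toNat) := by
        have hp : (0:Int) < 2 ^ dividend.toNat := pow_pos (by norm_num) _
        have : divisor * 2 ^ (0 + 1 + dividend.toNat) = divisor * 2 * 2 ^ dividend.toNat := by ring
        nlinarith
      omega
    rw [descendB_eq divisor hd (ascendB dividend divisor 0 dividend.toNat) dividend 0 h0 hasc]
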